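-- pv_equiv track=rewrite | github.com/DEAVEN-MITCH/2024Compiler-Course | src/lian/util/util.py | calc_path_distance
-- ===== SOURCE A (Python) =====
-- def calc_path_distance(path1, path2):
--     # Split the paths into components
--     components1 = path1.split('/')
--     components2 = path2.split('/')
--
--     # Count the differing components
--     length = max(len(components1), len(components2))
--
--     distance = 0
--     for i in range(length):
--         if i >= len(components1) or i >= len(components2) or components1[i] != components2[i]:
--             distance += 1
--
--     return distance
-- ===== SOURCE B (Python) =====
-- def calc_path_distance(path1, path2):
--     c1 = path1.split('/')
--     c2 = path2.split('/')
--
--     def diff(lo, hi):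
--         # number of differing component positions in index range [lo, hi)
--         if hi - lo == 0:
--             return 0
--         if hi - lo == 1:
--             if lo >= len(c1) or lo >= len(c2):
--                 return 1
--             return 1 if c1[lo] != c2[lo] else 0
--         mid = (lo + hi) // 2
--         return diff(lo, mid) + diff(mid, hi)
--
--     return diff(0, max(len(c1), len(c2)))
-- ===== Notes on version B (the rewrite author's own statement) =====
-- stated objective: alternative
-- what changed: Replaces the single index loop over range(max(len1,len2)) by a divide-and-conquer recursion that halves the index range and sums the differing-position counts of the two halves, with one-index base cases.
import Mathlib
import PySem

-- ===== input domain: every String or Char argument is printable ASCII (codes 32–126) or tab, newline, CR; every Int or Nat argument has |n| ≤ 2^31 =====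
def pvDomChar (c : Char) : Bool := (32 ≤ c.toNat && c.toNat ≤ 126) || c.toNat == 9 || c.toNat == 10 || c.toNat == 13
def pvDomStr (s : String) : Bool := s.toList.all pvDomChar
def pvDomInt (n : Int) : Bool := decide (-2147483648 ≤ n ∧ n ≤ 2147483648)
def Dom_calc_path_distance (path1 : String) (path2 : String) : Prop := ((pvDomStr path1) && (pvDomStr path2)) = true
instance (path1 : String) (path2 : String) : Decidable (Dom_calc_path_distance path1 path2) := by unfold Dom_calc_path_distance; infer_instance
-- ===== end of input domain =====

-- B replaces the index loop over range(max(len1,len2)) by a divide-and-conquer recursion on the index range (alternative decomposition, same cost).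


-- s.split('/'): PySem.Str.split? returns none only for an empty separator, so with "/" it is always some
def pvSplitSlash (s : String) : List String := (PySem.Str.split? s "/").getD []

-- ===== PORT A =====
def calc_path_distance (path1 : String) (path2 : String) : Int :=
  let components1 := pvSplitSlash path1
  let components2 := pvSplitSlash path2
  let length : Int := max (components1.length : Int) (components2.length : Int)
  (PySem.List.pyRange 0 length 1).foldl
    (fun distance i =>
      if (components1.length : Int) ≤ i ∨ (components2.length : Int) ≤ i ∨
          PySem.List.pyGetD components1 i "" ≠ PySem.List.pyGetD components2 i "" then
        distance + 1
      else distance) 0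

-- ===== PORT B =====
-- inner helper diff(lo, hi) of Source B; lo, hi are the nonnegative index bounds
def pvDiff (c1 c2 : List String) (lo hi : Nat) : Int :=
  if hi - lo = 0 then 0
  else if hi - lo = 1 then
    if c1.length ≤ lo ∨ c2.length ≤ lo then 1
    else if c1.getD lo "" ≠ c2.getD lo "" then 1 else 0
  else
    pvDiff c1 c2 lo ((lo + hi) / 2) + pvDiff c1 c2 ((lo + hi) / 2) hi
termination_by hi - lo
decreasing_by all_goals omega

def calc_path_distance_alt (path1 : String) (path2 : String) : Int :=
  let c1 := pvSplitSlash path1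
  let c2 := pvSplitSlash path2
  pvDiff c1 c2 0 (max c1.length c2.length)

-- ===== PRECONDITION & SPEC =====
def Spec_calc_path_distance (path1 : String) (path2 : String) (out : Int) : Prop := out = calc_path_distance_alt path1 path2
instance (path1 : String) (path2 : String) (out : Int) : Decidable (Spec_calc_path_distance path1 path2 out) := by unfold Spec_calc_path_distance; infer_instance

-- ===== CLAIM (what is proved, stated in full; the proofs are below) =====
def Claim_equal_calc_path_distance : Prop := ∀ (path1 : String) (path2 : String), Dom_calc_path_distance path1 path2 → Spec_calc_path_distance path1 path2 (calc_path_distance path1 path2)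

-- ===== LEMMAS AND PROOFS =====

-- the Nat-index mismatch predicate both counts are about
def pvP (c1 c2 : List String) (k : Nat) : Bool :=
  decide (c1.length ≤ k ∨ c2.length ≤ k ∨ c1.getD k "" ≠ c2.getD k "")

-- the divide-and-conquer recursion counts exactly the mismatching indices of [lo, hi)
theorem pv_diff_eq (c1 c2 : List String) (n lo hi : Nat) (h : hi - lo = n) :
    pvDiff c1 c2 lo hi = ((List.range' lo (hi - lo)).countP (pvP c1 c2) : Int) := by
  induction n using Nat.strong_induction_on generalizing lo hi with
  | _ n ih =>
    rw [pvDiff]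
    by_cases h0 : hi - lo = 0
    · simp [h0]
    · by_cases h1 : hi - lo = 1
      · simp only [h1, if_true]
        rw [List.range'_one, List.countP_singleton]
        simp only [pvP, List.getD]
        by_cases hlen : c1.length ≤ lo ∨ c2.length ≤ lo
        · rcases hlen with hl | hl <;> simp [hl]
        · by_cases hne : c1[lo]?.getD "" = c2[lo]?.getD ""
          · simp [hlen, hne]
          · simp [hlen, hne]
      · simp only [h0, if_false, h1, if_false]
        have hlo : lo < (lo + hi) / 2 := by omega
        have hhi : (lo + hi) / 2 < hi := by omega
        rw [ih ((lo + hi) / 2 - lo) (by omega) lo ((lo + hi) / 2) rfl,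
          ih (hi - (lo + hi) / 2) (by omega) ((lo + hi) / 2) hi rfl]
        have hsplit : List.range' lo (hi - lo) =
            List.range' lo ((lo + hi) / 2 - lo) ++ List.range' ((lo + hi) / 2) (hi - (lo + hi) / 2) := by
          have := @List.range'_append lo ((lo + hi) / 2 - lo) (hi - (lo + hi) / 2) 1
          simp only [one_mul] at this
          rw [show lo + ((lo + hi) / 2 - lo) = (lo + hi) / 2 by omega] at this
          rw [show (lo + hi) / 2 - lo + (hi - (lo + hi) / 2) = hi - lo by omega] at this
          exact this.symm
        rw [hsplit, List.countP_append]
        push_cast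
        ring

-- ===== VERDICT (by name: the statement is the Claim_ definition above) =====
theorem calc_path_distance_spec : Claim_equal_calc_path_distance := by
  intro path1 path2 _
  unfold Spec_calc_path_distance calc_path_distance calc_path_distance_alt
  set l1 := pvSplitSlash path1 with hl1
  set l2 := pvSplitSlash path2 with hl2
  simp only
  rw [PySem.List.foldl_ite_add_one
    (p := fun i : Int => (l1.length : Int) ≤ i ∨ (l2.length : Int) ≤ i ∨
      PySem.List.pyGetD l1 i "" ≠ PySem.List.pyGetD l2 i "")]
  rw [PySem.List.pyRange_one, List.countP_map]
  have hcast : ((max (l1.length : Int) (l2.length : Int) - 0).toNat) = max l1.length l2.length := by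
    omega
  rw [hcast]
  have hcong : List.countP
      ((fun (i : Int) => decide ((l1.length : Int) ≤ i ∨ (l2.length : Int) ≤ i ∨
        PySem.List.pyGetD l1 i "" ≠ PySem.List.pyGetD l2 i "")) ∘ (fun (k : Nat) => (0 : Int) + (k : Int)))
      (List.range (max l1.length l2.length))
      = List.countP (pvP l1 l2) (List.range (max l1.length l2.length)) := by
    apply List.countP_congr
    intro k _
    simp [pvP, PySem.List.pyGetD_natCast]
  rw [hcong, pv_diff_eq l1 l2 (max l1.length l2.length) 0 (max l1.length l2.length) (by omega)]
  rw [List.range_eq_range']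
  simp
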